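-- pv_equiv track=rewrite | github.com/Jhon4561488228/MemFeelAI | MemorySystem/src/analyzers/relationship_analyzer.py | naive_relationships
-- ===== SOURCE A (Python) =====
-- from typing import List, Tuple
--
-- def naive_relationships(sentences: List[str]) -> List[Tuple[str, str, str]]:
--     """Очень простой анализатор связей: ищет повторяющиеся термины между предложениями
--     и добавляет связи similar_to.
--     Возвращает список (term, term, relation_type).
--     """
--     terms = [set(s.lower().split()) for s in sentences]
--     rels = []
--     for i in range(len(terms)):
--         for j in range(i + 1, len(terms)):
--             common = terms[i].intersection(terms[j])
--             if len(common) >= 2: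
--                 rels.append((f"sent{i}", f"sent{j}", "similar_to"))
--     return rels
-- ===== SOURCE B (Python) =====
-- from typing import List, Tuple
--
-- def naive_relationships(sentences: List[str]) -> List[Tuple[str, str, str]]:
--     # Inverted index word -> sentence indices, then a pair co-occurrence counter,
--     # instead of intersecting every pair of sentence word-sets.
--     index = {}
--     for i, s in enumerate(sentences):
--         for w in set(s.lower().split()):
--             index.setdefault(w, []).append(i)
--     counts = {}
--     for idxs in index.values():
--         for b in idxs:
--             for a in idxs:
--                 if a < b:
--                     key = (a, b)
--                     counts[key] = counts.get(key, 0) + 1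
--     n = len(sentences)
--     return [(f"sent{i}", f"sent{j}", "similar_to")
--             for i in range(n) for j in range(i + 1, n)
--             if counts.get((i, j), 0) >= 2]
-- ===== Notes on version B (the rewrite author's own statement) =====
-- stated objective: alternative
-- what changed: Replaces the per-pair set intersections by an inverted index (word -> list of sentence indices) plus a pair co-occurrence counter dict; the final i<j emission loop only looks the pair count up.
import Mathlib
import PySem

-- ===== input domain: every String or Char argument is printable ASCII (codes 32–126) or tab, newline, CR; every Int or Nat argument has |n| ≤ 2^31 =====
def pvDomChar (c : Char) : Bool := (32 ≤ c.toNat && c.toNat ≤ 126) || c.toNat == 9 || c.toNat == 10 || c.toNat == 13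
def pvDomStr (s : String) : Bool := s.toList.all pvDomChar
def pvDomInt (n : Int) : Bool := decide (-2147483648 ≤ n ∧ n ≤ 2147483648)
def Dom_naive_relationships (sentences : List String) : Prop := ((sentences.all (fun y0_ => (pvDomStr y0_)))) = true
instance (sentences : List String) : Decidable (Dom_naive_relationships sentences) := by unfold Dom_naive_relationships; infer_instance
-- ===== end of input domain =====

-- B replaces the per-pair set intersections by an inverted index (word -> sentence
-- indices) and a pair co-occurrence counter; objective: alternative algorithm.

-- ===== PORT A =====
-- set(s.lower().split()) — shared preprocessing of both Pythons
def pvTermOf (s : String) : PySem.Set String :=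
  PySem.Set.ofList (PySem.Str.split₀ (PySem.Str.lower s))

def naive_relationships (sentences : List String) : List (String × String × String) :=
  let terms := sentences.map (fun s => pvTermOf s)
  (PySem.List.pyRange 0 (terms.length : Int)).foldl (fun rels i =>
    (PySem.List.pyRange (i + 1) (terms.length : Int)).foldl (fun rels j =>
      let common := PySem.Set.inter (PySem.List.pyGetD terms i []) (PySem.List.pyGetD terms j [])
      if 2 ≤ common.length then
        rels ++ [("sent" ++ PySem.Int.toStr i, "sent" ++ PySem.Int.toStr j, "similar_to")]
      else rels) rels) []

-- ===== PORT B =====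
def naive_relationships_alt (sentences : List String) : List (String × String × String) :=
  let index : PySem.Dict String (List Int) :=
    (PySem.List.enumerate sentences).foldl (fun d p =>
      (pvTermOf p.2).foldl (fun d w => d.modify w [] (fun v => v ++ [p.1])) d) PySem.Dict.empty
  let counts : PySem.Dict (Int × Int) Int :=
    index.values.foldl (fun c idxs =>
      idxs.foldl (fun c b =>
        idxs.foldl (fun c a =>
          if a < b then c.insert (a, b) (c.getD (a, b) 0 + 1) else c) c) c) PySem.Dict.empty
  let n := sentences.length
  (PySem.List.pyRange 0 (n : Int)).flatMap (fun i =>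
    (PySem.List.pyRange (i + 1) (n : Int)).flatMap (fun j =>
      if 2 ≤ counts.getD (i, j) 0 then
        [("sent" ++ PySem.Int.toStr i, "sent" ++ PySem.Int.toStr j, "similar_to")]
      else []))

-- ===== PRECONDITION & SPEC =====
def Spec_naive_relationships (sentences : List String) (out : List (String × String × String)) : Prop := out = naive_relationships_alt sentences
instance (sentences : List String) (out : List (String × String × String)) : Decidable (Spec_naive_relationships sentences out) := by unfold Spec_naive_relationships; infer_instance

-- ===== CLAIM (what is proved, stated in full; the proofs are below) =====
def Claim_equal_naive_relationships : Prop := ∀ (sentences : List String), Dom_naive_relationships sentences → Spec_naive_relationships sentences (naive_relationships sentences)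

-- ===== LEMMAS AND PROOFS =====

def pvIndex (sentences : List String) : PySem.Dict String (List Int) :=
  (PySem.List.enumerate sentences).foldl (fun d p =>
    (pvTermOf p.2).foldl (fun d w => d.modify w [] (fun v => v ++ [p.1])) d) PySem.Dict.empty
def pvPairsL (sentences : List String) : List (String × Int) :=
  (PySem.List.enumerate sentences).flatMap (fun p => (pvTermOf p.2).map (fun w => (w, p.1)))

theorem pvIndex_eq_flat (ss : List String) :
    pvIndex ss = (pvPairsL ss).foldl (fun d q => d.modify q.1 [] (fun v => v ++ [q.2])) PySem.Dict.empty := by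
  simp [pvIndex, pvPairsL, List.flatMap, List.foldl_flatten, List.foldl_map]
def pvPost (sentences : List String) (w : String) : List Int := (pvIndex sentences).getD w []

theorem pv_nodup_term (s : String) : (pvTermOf s).Nodup := PySem.Set.nodup_ofList _

theorem pvPost_flat (ss : List String) (w : String) :
    pvPost ss w = (PySem.List.enumerate ss).flatMap (fun p => if w ∈ pvTermOf p.2 then [p.1] else []) := by
  rw [pvPost, pvIndex_eq_flat, PySem.Dict.getD_foldl_modify_append]
  simp only [pvPairsL, List.filter_flatMap, List.map_flatMap]
  refine List.flatMap_congr (fun p _ => ?_)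
  rw [List.filter_map]
  have h1 : ((fun q : String × Int => q.1 == w) ∘ fun w' => (w', p.1)) = (fun w' => w' == w) := rfl
  rw [h1, List.filter_beq]
  by_cases h : w ∈ pvTermOf p.2
  · rw [List.count_eq_one_of_mem (pv_nodup_term _) h]; simp [h]
  · rw [List.count_eq_zero.mpr h]; simp [h]
theorem pv_flatMap_if {α β : Type} (p : α → Bool) (f : α → β) (l : List α) :
    l.flatMap (fun x => if p x then [f x] else []) = (l.filter p).map f := by
  induction l with
  | nil => rfl
  | cons a t ih => by_cases h : p a <;> simp [List.flatMap_cons, h, ih]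

theorem pv_mem_post (ss : List String) (w : String) (i : Int) :
    i ∈ pvPost ss w ↔ ∃ (k : Nat) (h : k < ss.length), i = (k : Int) ∧ w ∈ pvTermOf ss[k] := by
  rw [pvPost_flat]
  simp only [List.mem_flatMap, PySem.List.mem_enumerate_iff]
  constructor
  · rintro ⟨p, ⟨k, hk, rfl⟩, hm⟩
    by_cases h : w ∈ pvTermOf (ss[k]) <;> simp [h] at hm
    exact ⟨k, hk, by simpa using hm, h⟩
  · rintro ⟨k, hk, rfl, h⟩
    exact ⟨((k : Int), ss[k]), ⟨k, hk, by simp⟩, by simp [h]⟩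

theorem pv_nodup_post (ss : List String) (w : String) : (pvPost ss w).Nodup := by
  rw [pvPost_flat]
  have h : (PySem.List.enumerate ss).flatMap (fun p => if w ∈ pvTermOf p.2 then [p.1] else [])
      = ((PySem.List.enumerate ss).filter (fun p => decide (w ∈ pvTermOf p.2))).map (·.1) := by
    rw [← pv_flatMap_if]
    exact List.flatMap_congr (fun p _ => by by_cases h : w ∈ pvTermOf p.2 <;> simp [h])
  rw [h]
  have hpw : ((PySem.List.enumerate ss).filter (fun p => decide (w ∈ pvTermOf p.2))).Pairwise (fun p q => p.1 < q.1) :=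
    (PySem.List.pairwise_lt_enumerate ss 0).filter _
  exact (List.pairwise_map.mpr (hpw.imp (fun h => h))).imp (fun h => ne_of_lt h)
theorem pvKeys_eq (ss : List String) :
    (pvIndex ss).keys = PySem.Set.ofList ((pvPairsL ss).map (fun q => q.1)) := by
  rw [pvIndex_eq_flat]
  rw [PySem.Dict.keys_foldl_modify_key (pvPairsL ss) (fun q => q.1) [] (fun _ q v => v ++ [q.2])]
  simp [PySem.Set.update_nil_left]

theorem pv_nodup_keys (ss : List String) : (pvIndex ss).keys.Nodup := by
  rw [pvKeys_eq]; exact PySem.Set.nodup_ofList _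

theorem pv_mem_keys (ss : List String) (w : String) (k : Nat) (hk : k < ss.length)
    (hw : w ∈ pvTermOf ss[k]) : w ∈ (pvIndex ss).keys := by
  rw [pvKeys_eq, PySem.Set.mem_ofList]
  simp only [List.mem_map, pvPairsL, List.mem_flatMap, PySem.List.mem_enumerate_iff]
  exact ⟨(w, (k : Int)), ⟨((k : Int), ss[k]), ⟨k, hk, by simp⟩, by simp [hw]⟩, rfl⟩
def pvKeysOf (idxs : List Int) : List (Int × Int) :=
  idxs.flatMap (fun b => (idxs.filter (fun a => a < b)).map (fun a => (a, b)))

theorem pv_count_row (idxs : List Int) (b : Int) (c : PySem.Dict (Int × Int) Int) (v : Int × Int) :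
    (idxs.foldl (fun c a => if a < b then c.insert (a, b) (c.getD (a, b) 0 + 1) else c) c).getD v 0
      = c.getD v 0 + (((idxs.filter (fun a => decide (a < b))).map (fun a => (a, b))).count v : Int) := by
  have h1 := (List.foldl_filter (p := fun a => decide (a < b))
    (f := fun c a => c.insert (a, b) (c.getD (a, b) 0 + 1)) (l := idxs) (init := c)).symm
  simp only [decide_eq_true_eq] at h1
  rw [h1, ← List.foldl_map (f := fun a => (a, b))
    (g := fun (c : PySem.Dict (Int × Int) Int) k => c.insert k (c.getD k 0 + 1))]
  exact PySem.Dict.getD_foldl_insert_add_one _ _ _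

theorem pv_count_block (idxs : List Int) (bs : List Int) (c : PySem.Dict (Int × Int) Int) (v : Int × Int) :
    (bs.foldl (fun c b => idxs.foldl (fun c a => if a < b then c.insert (a, b) (c.getD (a, b) 0 + 1) else c) c) c).getD v 0
      = c.getD v 0 + ((bs.flatMap (fun b => (idxs.filter (fun a => decide (a < b))).map (fun a => (a, b)))).count v : Int) := by
  induction bs generalizing c with
  | nil => simp
  | cons b t ih =>
    rw [List.foldl_cons, ih, pv_count_row, List.flatMap_cons, List.count_append]
    push_cast; ring

def pvCounts (sentences : List String) : PySem.Dict (Int × Int) Int :=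
  (pvIndex sentences).values.foldl (fun c idxs =>
    idxs.foldl (fun c b =>
      idxs.foldl (fun c a =>
        if a < b then c.insert (a, b) (c.getD (a, b) 0 + 1) else c) c) c) PySem.Dict.empty

theorem pvCounts_getD (ss : List String) (v : Int × Int) :
    (pvCounts ss).getD v 0
      = ((pvIndex ss).values.map (fun idxs => ((pvKeysOf idxs).count v : Int))).sum := by
  rw [pvCounts]
  have h : ∀ (vls : List (List Int)) (c : PySem.Dict (Int × Int) Int),
      (vls.foldl (fun c idxs =>
        idxs.foldl (fun c b =>
          idxs.foldl (fun c a =>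
            if a < b then c.insert (a, b) (c.getD (a, b) 0 + 1) else c) c) c) c).getD v 0
      = c.getD v 0 + (vls.map (fun idxs => ((pvKeysOf idxs).count v : Int))).sum := by
    intro vls
    induction vls with
    | nil => simp
    | cons idxs t ih =>
      intro c
      rw [List.foldl_cons, ih, pv_count_block, List.map_cons, List.sum_cons, pvKeysOf]
      ring
  rw [h]; simp
theorem pv_sum_map_ite (l : List Int) (y : Int) (m : Nat) :
    (l.map (fun b => if b = y then m else 0)).sum = m * l.count y := by
  induction l with
  | nil => simp
  | cons b t ih =>
    by_cases h : b = y <;> simp [h, ih, Nat.mul_succ] <;> try ring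

theorem pv_count_keysOf (idxs : List Int) (hnd : idxs.Nodup) (x y : Int) :
    ((pvKeysOf idxs).count (x, y) : Int) = if x ∈ idxs ∧ y ∈ idxs ∧ x < y then 1 else 0 := by
  rw [pvKeysOf, List.count_flatMap]
  have hper : ∀ b : Int, (List.count (x, y) ∘ fun b => (idxs.filter (fun a => decide (a < b))).map (fun a => (a, b))) b
      = if b = y then (idxs.filter (fun a => decide (a < y))).count x else 0 := by
    intro b
    simp only [Function.comp]
    by_cases h : b = y
    · subst h
      simp only [List.count, List.countP_map]
      congr 1
      funext a
      simp
    · rw [if_neg h]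
      rw [List.count_eq_zero]
      simp only [List.mem_map, List.mem_filter]
      rintro ⟨a, _, ha2⟩
      exact h (congrArg Prod.snd ha2)
  rw [List.map_congr_left (fun b _ => hper b), pv_sum_map_ite]
  by_cases hy : y ∈ idxs
  · rw [List.count_eq_one_of_mem hnd hy, Nat.mul_one]
    by_cases hxy : x < y
    · rw [List.count_filter (by simpa using hxy)]
      by_cases hx : x ∈ idxs
      · rw [List.count_eq_one_of_mem hnd hx, if_pos ⟨hx, hy, hxy⟩]; rfl
      · rw [List.count_eq_zero.mpr hx, if_neg (fun hc => hx hc.1)]; rfl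
    · rw [List.count_eq_zero.mpr (fun hc => hxy (by simpa using (List.mem_filter.mp hc).2)),
        if_neg (fun hc => hxy hc.2.2)]
      rfl
  · rw [List.count_eq_zero.mpr hy, Nat.mul_zero, if_neg (fun hc => hy hc.2.1)]
    rfl
theorem pv_counts_eq_inter (ss : List String) (i j : Nat) (hi : i < ss.length) (hj : j < ss.length)
    (hij : i < j) :
    (pvCounts ss).getD ((i : Int), (j : Int)) 0
      = ((PySem.Set.inter (pvTermOf ss[i]) (pvTermOf ss[j])).length : Int) := by
  rw [pvCounts_getD, PySem.Dict.values_eq_map_keys (pvIndex ss) (pv_nodup_keys ss) [], List.map_map]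
  have hper : ∀ w ∈ (pvIndex ss).keys,
      (((fun idxs => ((pvKeysOf idxs).count ((i : Int), (j : Int)) : Int)) ∘ fun k => (pvIndex ss).getD k []) w)
      = if decide (w ∈ pvTermOf ss[i] ∧ w ∈ pvTermOf ss[j]) then (1 : Int) else 0 := by
    intro w _
    simp only [Function.comp]
    rw [show (pvIndex ss).getD w [] = pvPost ss w from rfl, pv_count_keysOf _ (pv_nodup_post ss w)]
    by_cases hc : w ∈ pvTermOf ss[i] ∧ w ∈ pvTermOf ss[j]
    · rw [if_pos ⟨(pv_mem_post ss w i).mpr ⟨i, hi, rfl, hc.1⟩,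
        (pv_mem_post ss w j).mpr ⟨j, hj, rfl, hc.2⟩, by exact_mod_cast hij⟩, if_pos (by simpa using hc)]
    · rw [if_neg, if_neg (by simpa using hc)]
      rintro ⟨h1, h2, -⟩
      obtain ⟨k, hk, hki, hwk⟩ := (pv_mem_post ss w i).mp h1
      obtain ⟨k', hk', hkj, hwk'⟩ := (pv_mem_post ss w j).mp h2
      have hik : i = k := by exact_mod_cast hki
      have hjk : j = k' := by exact_mod_cast hkj
      subst hik; subst hjk
      exact hc ⟨hwk, hwk'⟩
  rw [List.map_congr_left hper, PySem.List.sum_map_ite_one_zero]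
  have hp : List.countP (fun w => decide (w ∈ pvTermOf ss[i] ∧ w ∈ pvTermOf ss[j])) (pvIndex ss).keys
      = (PySem.Set.inter (pvTermOf ss[i]) (pvTermOf ss[j])).length := by
    rw [List.countP_eq_length_filter]
    refine List.Perm.length_eq ?_
    rw [show PySem.Set.inter (pvTermOf ss[i]) (pvTermOf ss[j])
        = (pvTermOf ss[i]).filter (fun x => (pvTermOf ss[j]).contains x) from rfl]
    rw [List.perm_ext_iff_of_nodup ((pv_nodup_keys ss).filter _) ((pv_nodup_term _).filter _)]
    intro a
    simp only [List.mem_filter, decide_eq_true_eq]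
    constructor
    · rintro ⟨-, ha1, ha2⟩
      exact ⟨ha1, (PySem.Set.contains_iff _ _).mpr ha2⟩
    · rintro ⟨ha1, ha2⟩
      exact ⟨pv_mem_keys ss a i hi ha1, ha1, (PySem.Set.contains_iff _ _).mp ha2⟩
  rw [hp]
theorem naive_relationships_spec' (ss : List String) :
    naive_relationships ss = naive_relationships_alt ss := by
  have hB : naive_relationships_alt ss
      = (PySem.List.pyRange 0 (ss.length : Int)).flatMap (fun i =>
          (PySem.List.pyRange (i + 1) (ss.length : Int)).flatMap (fun j =>
            if 2 ≤ (pvCounts ss).getD (i, j) 0 then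
              [("sent" ++ PySem.Int.toStr i, "sent" ++ PySem.Int.toStr j, "similar_to")]
            else [])) := rfl
  have hInner : ∀ (i : Int) (rels : List (String × String × String)),
      (PySem.List.pyRange (i + 1) (ss.length : Int)).foldl (fun rels j =>
        if 2 ≤ (PySem.Set.inter (PySem.List.pyGetD (ss.map (fun s => pvTermOf s)) i [])
            (PySem.List.pyGetD (ss.map (fun s => pvTermOf s)) j [])).length then
          rels ++ [("sent" ++ PySem.Int.toStr i, "sent" ++ PySem.Int.toStr j, "similar_to")]
        else rels) rels
      = rels ++ ((PySem.List.pyRange (i + 1) (ss.length : Int)).filter (fun j =>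
            decide (2 ≤ (PySem.Set.inter (PySem.List.pyGetD (ss.map (fun s => pvTermOf s)) i [])
              (PySem.List.pyGetD (ss.map (fun s => pvTermOf s)) j [])).length))).map (fun j =>
          ("sent" ++ PySem.Int.toStr i, "sent" ++ PySem.Int.toStr j, "similar_to")) := by
    intro i rels
    have := PySem.List.foldl_append_if (fun j =>
        decide (2 ≤ (PySem.Set.inter (PySem.List.pyGetD (ss.map (fun s => pvTermOf s)) i [])
          (PySem.List.pyGetD (ss.map (fun s => pvTermOf s)) j [])).length))
      (fun j => ("sent" ++ PySem.Int.toStr i, "sent" ++ PySem.Int.toStr j, "similar_to"))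
      (PySem.List.pyRange (i + 1) (ss.length : Int)) rels
    simpa only [decide_eq_true_eq] using this
  have hA : naive_relationships ss
      = (PySem.List.pyRange 0 (ss.length : Int)).flatMap (fun i =>
          ((PySem.List.pyRange (i + 1) (ss.length : Int)).filter (fun j =>
            decide (2 ≤ (PySem.Set.inter (PySem.List.pyGetD (ss.map (fun s => pvTermOf s)) i [])
              (PySem.List.pyGetD (ss.map (fun s => pvTermOf s)) j [])).length))).map (fun j =>
          ("sent" ++ PySem.Int.toStr i, "sent" ++ PySem.Int.toStr j, "similar_to"))) := by
    show (PySem.List.pyRange 0 ((ss.map (fun s => pvTermOf s)).length : Int)).foldl _ [] = _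
    simp only [List.length_map]
    rw [show (fun (rels : List (String × String × String)) (i : Int) =>
        (PySem.List.pyRange (i + 1) (ss.length : Int)).foldl (fun rels j =>
          if 2 ≤ (PySem.Set.inter (PySem.List.pyGetD (ss.map (fun s => pvTermOf s)) i [])
              (PySem.List.pyGetD (ss.map (fun s => pvTermOf s)) j [])).length then
            rels ++ [("sent" ++ PySem.Int.toStr i, "sent" ++ PySem.Int.toStr j, "similar_to")]
          else rels) rels)
      = fun rels i => rels ++ ((PySem.List.pyRange (i + 1) (ss.length : Int)).filter (fun j =>
            decide (2 ≤ (PySem.Set.inter (PySem.List.pyGetD (ss.map (fun s => pvTermOf s)) i [])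
              (PySem.List.pyGetD (ss.map (fun s => pvTermOf s)) j [])).length))).map (fun j =>
          ("sent" ++ PySem.Int.toStr i, "sent" ++ PySem.Int.toStr j, "similar_to"))
      from funext fun rels => funext fun i => hInner i rels]
    rw [PySem.List.foldl_append_eq_flatMap]
    rfl
  rw [hA, hB]
  refine List.flatMap_congr (fun i hi => ?_)
  obtain ⟨hi0, hin⟩ := PySem.List.mem_pyRange_one.mp hi
  have hBi : (PySem.List.pyRange (i + 1) (ss.length : Int)).flatMap (fun j =>
      if 2 ≤ (pvCounts ss).getD (i, j) 0 then
        [("sent" ++ PySem.Int.toStr i, "sent" ++ PySem.Int.toStr j, "similar_to")]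
      else [])
      = ((PySem.List.pyRange (i + 1) (ss.length : Int)).filter (fun j =>
          decide (2 ≤ (pvCounts ss).getD (i, j) 0))).map (fun j =>
        ("sent" ++ PySem.Int.toStr i, "sent" ++ PySem.Int.toStr j, "similar_to")) := by
    rw [← pv_flatMap_if]
    refine List.flatMap_congr (fun j _ => ?_)
    by_cases h : 2 ≤ (pvCounts ss).getD (i, j) 0 <;> simp [h]
  rw [hBi]
  congr 1
  refine List.filter_congr (fun j hj => ?_)
  obtain ⟨hj1, hjn⟩ := PySem.List.mem_pyRange_one.mp hj
  have hj0 : 0 ≤ j := le_trans (by omega) hj1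
  obtain ⟨k, rfl⟩ : ∃ k : Nat, i = (k : Int) := ⟨i.toNat, (Int.toNat_of_nonneg hi0).symm⟩
  obtain ⟨m, rfl⟩ : ∃ m : Nat, j = (m : Int) := ⟨j.toNat, (Int.toNat_of_nonneg hj0).symm⟩
  have hkn : k < ss.length := by exact_mod_cast hin
  have hmn : m < ss.length := by exact_mod_cast hjn
  have hkm : k < m := by exact_mod_cast lt_of_lt_of_le (by omega : (k : Int) < (k : Int) + 1) hj1
  have hgi : PySem.List.pyGetD (ss.map (fun s => pvTermOf s)) (k : Int) [] = pvTermOf ss[k] := by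
    rw [PySem.List.pyGetD_natCast, List.getD_eq_getElem _ _ (by simpa using hkn), List.getElem_map]
  have hgj : PySem.List.pyGetD (ss.map (fun s => pvTermOf s)) (m : Int) [] = pvTermOf ss[m] := by
    rw [PySem.List.pyGetD_natCast, List.getD_eq_getElem _ _ (by simpa using hmn), List.getElem_map]
  rw [hgi, hgj, pv_counts_eq_inter ss k m hkn hmn hkm]
  simp only [decide_eq_decide]
  exact_mod_cast Iff.rfl

-- ===== VERDICT (by name: the statement is the Claim_ definition above) =====
theorem naive_relationships_spec : Claim_equal_naive_relationships := by
  intro ss _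
  unfold Spec_naive_relationships
  exact naive_relationships_spec' ss
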